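-- pv_equiv track=rewrite | github.com/turnkeylinux/tkldev-detective | libtkldet/fuzzy.py | fuzzy_suggest
-- ===== SOURCE A (Python) =====
-- MAX_DIFF = 3
--
-- def fuzzy_diff(x: str, y: str) -> int:
--     """
--     Calculate difference between two strings
--
--     Return value has no objective meaning, only for comparison
--     """
--     diff = 0
--     for i in range(max(len(x), len(y))):
--         if len(x) <= i or len(y) <= i:
--             diff += 1
--         else:
--             diff += x[i] != y[i]
--     return diff
--
-- def fuzzy_suggest(
--     check: str, options: list[str], max_diff: int = MAX_DIFF
-- ) -> str | None:
--     """
--     Suggest a string from given options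
--
--     Given a 'check' value, and a list of valid options, find the option
--     closest to the 'check' value, given that it's 'difference' (calculated by
--     'fuzzy_diff' is less than or equal to max_diff
--     """
--     weighted_options = [(word, fuzzy_diff(check, word)) for word in options]
--     weighted_options = sorted(weighted_options, key=lambda x: x[1])
--     if weighted_options[0][1] > max_diff:
--         return None
--     return weighted_options[0][0]
-- ===== SOURCE B (Python) =====
-- MAX_DIFF = 3
--
-- def fuzzy_diff(x: str, y: str) -> int:
--     """
--     Calculate difference between two strings
--
--     Return value has no objective meaning, only for comparison
--     """
--     diff = 0
--     for i in range(max(len(x), len(y))):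
--         if len(x) <= i or len(y) <= i:
--             diff += 1
--         else:
--             diff += x[i] != y[i]
--     return diff
--
-- def fuzzy_suggest(check: str, options: list[str], max_diff: int = MAX_DIFF) -> str | None:
--     # single pass: track the earliest option with the strictly smallest diff
--     best_word = options[0]
--     best_diff = fuzzy_diff(check, best_word)
--     for word in options[1:]:
--         d = fuzzy_diff(check, word)
--         if d < best_diff:
--             best_word, best_diff = word, d
--     return None if best_diff > max_diff else best_word
-- ===== Notes on version B (the rewrite author's own statement) =====
-- stated objective: simpler
-- what changed: Replaces build-weighted-list + stable sort + take-head with a single running-minimum pass (strict-less update preserves the stable sort's earliest-minimum tie-breaking); no intermediate list, no sort.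
import Mathlib
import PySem

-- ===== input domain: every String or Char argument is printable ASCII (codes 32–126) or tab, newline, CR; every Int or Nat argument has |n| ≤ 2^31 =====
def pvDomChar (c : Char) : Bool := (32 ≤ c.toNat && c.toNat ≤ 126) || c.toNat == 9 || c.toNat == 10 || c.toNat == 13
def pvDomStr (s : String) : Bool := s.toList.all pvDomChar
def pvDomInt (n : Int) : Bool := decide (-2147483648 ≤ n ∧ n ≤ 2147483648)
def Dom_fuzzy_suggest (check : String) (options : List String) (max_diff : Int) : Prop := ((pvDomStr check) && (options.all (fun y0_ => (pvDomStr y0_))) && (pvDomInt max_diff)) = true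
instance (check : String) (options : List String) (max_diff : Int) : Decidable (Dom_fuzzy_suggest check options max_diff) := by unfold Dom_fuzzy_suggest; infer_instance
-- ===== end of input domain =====

-- B replaces the sort-then-head of A with a single strict-less running-minimum pass (simpler, no intermediate sorted list); equal wherever A returns (Pre_ excludes the empty list, where both raise IndexError).


-- ===== PORT A =====
-- shared helper: literal port of fuzzy_diff (unchanged between A and B)
def fuzzy_diff (x : String) (y : String) : Int :=
  (PySem.List.pyRange 0 (max (PySem.Str.len x) (PySem.Str.len y)) 1).foldl
    (fun diff i =>
      if PySem.Str.len x ≤ i ∨ PySem.Str.len y ≤ i then diff + 1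
      else diff + (if PySem.Str.pyGet? x i ≠ PySem.Str.pyGet? y i then 1 else 0)) 0

def fuzzy_suggest (check : String) (options : List String) (max_diff : Int) : Option String :=
  let weighted := options.map (fun word => (word, fuzzy_diff check word))
  let w := PySem.List.sorted weighted (fun p => p.2)
  match PySem.List.pyGet? w 0 with
  | none => none    -- IndexError on empty options; excluded by Pre_
  | some p => if p.2 > max_diff then none else some p.1

-- ===== PORT B =====
def fuzzy_suggest_alt (check : String) (options : List String) (max_diff : Int) : Option String :=
  match options with
  | [] => none      -- IndexError on empty options; excluded by Pre_
  | w :: rest =>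
    let best := rest.foldl (fun acc word =>
        let d := fuzzy_diff check word
        if d < acc.2 then (word, d) else acc) (w, fuzzy_diff check w)
    if best.2 > max_diff then none else some best.1

-- ===== PRECONDITION & SPEC =====
-- Pre_ excludes only the empty options list, on which both Pythons raise IndexError.
def Pre_fuzzy_suggest (check : String) (options : List String) (max_diff : Int) : Prop :=
  options ≠ []
instance (check : String) (options : List String) (max_diff : Int) : Decidable (Pre_fuzzy_suggest check options max_diff) := by unfold Pre_fuzzy_suggest; infer_instance

def pvWitness_fuzzy_suggest : String × List String × Int := ("abc", ["abd", "xyz"], 3)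
def Spec_fuzzy_suggest (check : String) (options : List String) (max_diff : Int) (out : Option String) : Prop := out = fuzzy_suggest_alt check options max_diff
instance (check : String) (options : List String) (max_diff : Int) (out : Option String) : Decidable (Spec_fuzzy_suggest check options max_diff out) := by unfold Spec_fuzzy_suggest; infer_instance

-- ===== CLAIM (what is proved, stated in full; the proofs are below) =====
def Claim_equal_fuzzy_suggest : Prop := ∀ (check : String) (options : List String) (max_diff : Int), Dom_fuzzy_suggest check options max_diff → Pre_fuzzy_suggest check options max_diff → Spec_fuzzy_suggest check options max_diff (fuzzy_suggest check options max_diff)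

-- ===== LEMMAS AND PROOFS =====

-- head of insertBy into a nonempty list
theorem head?_insertBy {α : Type} (bef : α → α → Bool) (x y : α) (ys : List α) :
    (PySem.List.insertBy bef x (y :: ys)).head? = some (if bef x y then x else y) := by
  simp [PySem.List.insertBy]
  split <;> simp

theorem pyGet?_zero {α : Type} (xs : List α) : PySem.List.pyGet? xs 0 = xs.head? := by
  cases xs <;> simp [PySem.List.pyGet?, PySem.List.pyIdx?]

-- invariant: the head of the insertion-sort fold is the earliest strict minimum
theorem foldl_insert_head {α : Type} (key : α → Int) :
    ∀ (t acc : List α) (h : α), acc.head? = some h →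
      (t.foldl (fun a x => PySem.List.insertBy (fun a b => decide (key a < key b)) x a) acc).head?
        = some (t.foldl (fun m o => if key o < key m then o else m) h) := by
  intro t
  induction t with
  | nil => intro acc h hh; simpa using hh
  | cons o t ih =>
    intro acc h hh
    cases acc with
    | nil => simp at hh
    | cons a tl =>
      simp only [List.head?_cons, Option.some.injEq] at hh
      subst hh
      simp only [List.foldl_cons]
      rw [ih _ (if key o < key a then o else a)]
      rw [head?_insertBy]
      split <;> simp_all

-- ===== VERDICT (by name: the statement is the Claim_ definition above) =====
theorem fuzzy_suggest_spec : Claim_equal_fuzzy_suggest := by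
  intro check options max_diff _ hpre
  unfold Spec_fuzzy_suggest fuzzy_suggest fuzzy_suggest_alt
  cases options with
  | nil => exact absurd rfl hpre
  | cons w rest =>
    have hsorted :
        (PySem.List.sorted ((w :: rest).map (fun word => (word, fuzzy_diff check word)))
            (fun p => p.2)).head?
          = some (rest.foldl
              (fun m o => if (fuzzy_diff check o) < m.2 then (o, fuzzy_diff check o) else m)
              (w, fuzzy_diff check w)) := by
      rw [PySem.List.sorted_eq_foldl_insertBy]
      simp only [List.map_cons, List.foldl_cons]
      have h1 : PySem.List.insertBy
          (fun a b => decide ((fun p : String × Int => p.2) a < (fun p : String × Int => p.2) b))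
          (w, fuzzy_diff check w) ([] : List (String × Int)) = [(w, fuzzy_diff check w)] := by
        simp [PySem.List.insertBy]
      rw [h1, foldl_insert_head (fun p : String × Int => p.2) _ _ (w, fuzzy_diff check w) rfl,
        List.foldl_map]
    simp only [pyGet?_zero, hsorted]
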